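-- pv_equiv track=rewrite | github.com/ashish-bisht/leetcode_solutions | 763_partition_labels.py | partition_label
-- ===== SOURCE A (Python) =====
-- def partition_label(string):
--
--     last_postion_dict = {val: index for index, val in enumerate(string)}
--     res = []
--     right = 0
--     left = 0
--     for index, val in enumerate(string):
--         right = max(right, last_postion_dict[val])
--         if index == right:
--             res.append(right-left+1)
--             left = right + 1
--
--     return res
-- ===== SOURCE B (Python) =====
-- def partition_label(string):
--     # Brute-force cut test: position i ends a partition exactly when no character
--     # of string[:i+1] occurs again in string[i+1:]; emit differences of cut points.
--     n = len(string)
--     res = []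
--     prev = -1
--     for i in range(n):
--         if set(string[:i + 1]).isdisjoint(string[i + 1:]):
--             res.append(i - prev)
--             prev = i
--     return res
-- ===== Notes on version B (the rewrite author's own statement) =====
-- stated objective: simpler
-- what changed: Replaces A's last-occurrence dict plus running-max two-pointer scan by a direct per-index cut test: position i ends a partition iff set(string[:i+1]) is disjoint from string[i+1:], and the result is the differences of consecutive cut points; B is quadratic and therefore slower than A on large inputs.
import Mathlib
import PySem

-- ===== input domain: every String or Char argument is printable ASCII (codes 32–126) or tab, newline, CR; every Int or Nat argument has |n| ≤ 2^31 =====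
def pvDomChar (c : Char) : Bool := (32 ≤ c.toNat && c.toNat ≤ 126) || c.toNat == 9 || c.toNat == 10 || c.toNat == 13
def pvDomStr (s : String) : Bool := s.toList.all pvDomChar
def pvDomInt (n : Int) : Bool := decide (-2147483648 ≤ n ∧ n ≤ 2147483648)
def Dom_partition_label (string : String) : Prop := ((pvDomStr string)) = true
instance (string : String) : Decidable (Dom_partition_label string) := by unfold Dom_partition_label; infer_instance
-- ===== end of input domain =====

-- B replaces A's last-occurrence dict + running-max two-pointer scan by a direct
-- brute-force cut test on slices (a simpler decomposition; not faster).

-- ===== PORT A =====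
def partition_label (string : String) : List Int :=
  let chars := string.toList
  -- {val: index for index, val in enumerate(string)}
  let d : PySem.Dict Char Int :=
    (PySem.List.enumerate chars 0).foldl (fun d p => d.insert p.2 p.1) PySem.Dict.empty
  -- for index, val in enumerate(string): …   state = (res, right, left)
  let st := (PySem.List.enumerate chars 0).foldl
    (fun (st : List Int × Int × Int) p =>
      -- d[val]: the key is always present (val comes from the string itself),
      -- so getD's default is never consulted and this is exact.
      let right := max st.2.1 (d.getD p.2 0)
      if p.1 = right then (st.1 ++ [right - st.2.2 + 1], right, right + 1)
      else (st.1, right, st.2.2))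
    ([], 0, 0)
  st.1

-- ===== PORT B =====
def partition_label_alt (string : String) : List Int :=
  let chars := string.toList
  let n : Int := PySem.Chars.len chars
  -- for i in range(n): if set(string[:i+1]).isdisjoint(string[i+1:]): …
  -- (isdisjoint iterates the set's elements and tests membership in the other
  -- iterable; for a string argument that is character membership)
  let st := (PySem.List.pyRange 0 n 1).foldl
    (fun (st : List Int × Int) i =>
      if PySem.Set.isdisjoint (PySem.Set.ofList (PySem.List.slice chars none (some (i + 1))))
           (PySem.List.slice chars (some (i + 1)) none)
      then (st.1 ++ [i - st.2], i)
      else st)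
    ([], -1)
  st.1

-- ===== PRECONDITION & SPEC =====
def Spec_partition_label (string : String) (out : List Int) : Prop := out = partition_label_alt string
instance (string : String) (out : List Int) : Decidable (Spec_partition_label string out) := by unfold Spec_partition_label; infer_instance

-- ===== CLAIM (what is proved, stated in full; the proofs are below) =====
def Claim_equal_partition_label : Prop := ∀ (string : String), Dom_partition_label string → Spec_partition_label string (partition_label string)

-- ===== LEMMAS AND PROOFS =====

-- index of the last occurrence of c in l (none if absent)
def lastIdx : List Char → Char → Option Nat
  | [], _ => none
  | x :: xs, c =>
    match lastIdx xs c with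
    | some k => some (k + 1)
    | none => if x = c then some 0 else none

theorem lastIdx_append_singleton (l : List Char) (x c : Char) :
    lastIdx (l ++ [x]) c = if x = c then some l.length else lastIdx l c := by
  induction l with
  | nil => simp only [List.nil_append, lastIdx]; split <;> simp [*]
  | cons y ys ih =>
    simp only [List.cons_append, lastIdx, ih]
    by_cases hx : x = c
    · simp [hx]
    · simp only [hx, if_false]

theorem lastIdx_some_spec (l : List Char) (c : Char) (k : Nat)
    (h : lastIdx l c = some k) : k < l.length ∧ l[k]? = some c := by
  induction l generalizing k with
  | nil => simp [lastIdx] at h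
  | cons x xs ih =>
    unfold lastIdx at h
    rcases hx : lastIdx xs c with _ | k' <;> rw [hx] at h
    · simp only at h
      split at h
      · rename_i hxc
        obtain rfl : (0 : Nat) = k := Option.some.inj h
        exact ⟨by simp, by simp [hxc]⟩
      · simp at h
    · obtain rfl : k' + 1 = k := Option.some.inj h
      obtain ⟨h1, h2⟩ := ih k' hx
      exact ⟨by simpa using Nat.succ_lt_succ h1, by simpa using h2⟩

theorem lastIdx_ge (l : List Char) (c : Char) (j : Nat)
    (h : l[j]? = some c) : ∃ k, lastIdx l c = some k ∧ j ≤ k := by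
  induction l generalizing j with
  | nil => simp at h
  | cons x xs ih =>
    cases j with
    | zero =>
      have hxc : x = c := by simpa using h
      rcases hx : lastIdx xs c with _ | k'
      · exact ⟨0, by simp [lastIdx, hx, hxc], Nat.le_refl 0⟩
      · exact ⟨k' + 1, by simp [lastIdx, hx], Nat.zero_le _⟩
    | succ j =>
      obtain ⟨k', hk', hj⟩ := ih j (by simpa using h)
      exact ⟨k' + 1, by simp [lastIdx, hk'], Nat.succ_le_succ hj⟩

theorem lastIdx_last (l : List Char) (c : Char) (k : Nat)
    (h : lastIdx l c = some k) : ∀ m, k < m → l[m]? ≠ some c := by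
  induction l generalizing k with
  | nil => simp [lastIdx] at h
  | cons x xs ih =>
    intro m hm hcon
    unfold lastIdx at h
    rcases hx : lastIdx xs c with _ | k' <;> rw [hx] at h
    · simp only at h
      split at h
      · obtain rfl : (0 : Nat) = k := Option.some.inj h
        obtain ⟨m', rfl⟩ : ∃ m', m = m' + 1 := ⟨m - 1, by omega⟩
        obtain ⟨k'', hk'', _⟩ := lastIdx_ge xs c m' (by simpa using hcon)
        simp [hk''] at hx
      · simp at h
    · obtain rfl : k' + 1 = k := Option.some.inj h
      obtain ⟨m', rfl⟩ : ∃ m', m = m' + 1 := ⟨m - 1, by omega⟩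
      exact ih k' hx m' (by omega) (by simpa using hcon)

-- the value A's dict stores for c (0 default is never consulted for c ∈ l)
def lv (l : List Char) (c : Char) : Int := (((lastIdx l c).getD 0 : Nat) : Int)

def buildD (l : List Char) : PySem.Dict Char Int :=
  (PySem.List.enumerate l 0).foldl (fun d p => d.insert p.2 p.1) PySem.Dict.empty

theorem buildD_get? (l : List Char) (c : Char) :
    (buildD l).get? c = (lastIdx l c).map (fun k => (k : Int)) := by
  induction l using List.reverseRecOn with
  | nil => simp [buildD, lastIdx, PySem.List.enumerate_nil, PySem.Dict.get?_empty]
  | append_singleton l x ih =>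
    have h1 : PySem.List.enumerate (l ++ [x]) 0
        = PySem.List.enumerate l 0 ++ [((l.length : Int), x)] := by
      rw [PySem.List.enumerate_append]
      simp [PySem.List.enumerate_cons, PySem.List.enumerate_nil]
    have h2 : buildD (l ++ [x]) = (buildD l).insert x (l.length : Int) := by
      simp [buildD, h1, List.foldl_append]
    rw [h2, PySem.Dict.get?_insert, lastIdx_append_singleton, ih]
    by_cases hx : c = x
    · simp [hx]
    · have hx' : ¬ x = c := fun h => hx h.symm
      simp [hx, hx']

theorem buildD_getD (l : List Char) (c : Char) (_h : c ∈ l) :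
    (buildD l).getD c 0 = lv l c := by
  rw [PySem.Dict.getD_eq_get?_getD, buildD_get?]
  cases hk : lastIdx l c <;> simp [lv, hk]

-- the running max A maintains after processing the first m characters
def pmax (l : List Char) (m : Nat) : Int :=
  (l.take m).foldl (fun r c => max r (lv l c)) 0

theorem pmax_succ (l : List Char) (m : Nat) (hm : m < l.length) :
    pmax l (m + 1) = max (pmax l m) (lv l l[m]) := by
  unfold pmax
  rw [← List.take_concat_get (l := l) (i := m)]
  simp only [List.concat_eq_append, List.foldl_append, List.foldl_cons, List.foldl_nil]
  exact hm

theorem lv_getElem_ge (l : List Char) (m : Nat) (hm : m < l.length) :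
    (m : Int) ≤ lv l l[m] := by
  obtain ⟨k, hk, hmk⟩ := lastIdx_ge l l[m] m (List.getElem?_eq_getElem hm)
  simp [lv, hk]
  exact_mod_cast hmk

theorem le_pmax_succ (l : List Char) (m : Nat) (hm : m < l.length) :
    (m : Int) ≤ pmax l (m + 1) := by
  rw [pmax_succ l m hm]
  exact le_trans (lv_getElem_ge l m hm) (le_max_right _ _)

theorem foldl_max_le (xs : List Char) (f : Char → Int) (a X : Int) (ha : a ≤ X)
    (h : ∀ c ∈ xs, f c ≤ X) : xs.foldl (fun r c => max r (f c)) a ≤ X := by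
  induction xs generalizing a with
  | nil => simpa using ha
  | cons x xs ih =>
    exact ih (max a (f x)) (max_le ha (h x (by simp))) (fun c hc => h c (by simp [hc]))

theorem pmax_le (l : List Char) (m : Nat) (X : Int) (h0 : 0 ≤ X)
    (h : ∀ c ∈ l.take m, lv l c ≤ X) : pmax l m ≤ X :=
  foldl_max_le _ _ _ _ h0 h

theorem mem_drop_iff (l : List Char) (t : Nat) (c : Char) :
    c ∈ l.drop t ↔ ∃ j, t ≤ j ∧ ∃ hj : j < l.length, l[j] = c := by
  constructor
  · intro hc
    obtain ⟨i, hi, hieq⟩ := List.getElem_of_mem hc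
    rw [List.getElem_drop] at hieq
    exact ⟨t + i, Nat.le_add_right _ _, by rw [List.length_drop] at hi; omega, hieq⟩
  · rintro ⟨j, htj, hj, rfl⟩
    have : (l.drop t)[j - t]'(by rw [List.length_drop]; omega) = l[j] := by
      rw [List.getElem_drop]; congr 1; omega
    rw [← this]
    exact List.getElem_mem _

theorem lv_le_iff (l : List Char) (m : Nat) (c : Char) (hc : c ∈ l.take (m + 1)) :
    lv l c ≤ (m : Int) ↔ c ∉ l.drop (m + 1) := by
  have hcl : c ∈ l := List.mem_of_mem_take hc
  obtain ⟨j, hj, hjeq⟩ := List.getElem_of_mem hcl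
  obtain ⟨k, hk, _⟩ := lastIdx_ge l c j (by rw [List.getElem?_eq_getElem hj, hjeq])
  rw [show lv l c = (k : Int) by simp [lv, hk]]
  constructor
  · intro hkm hmem
    obtain ⟨j', hj', hj'len, hj'eq⟩ := (mem_drop_iff l (m + 1) c).1 hmem
    have hkm2 : k ≤ m := by exact_mod_cast hkm
    exact lastIdx_last l c k hk j' (by omega) (by rw [List.getElem?_eq_getElem hj'len, hj'eq])
  · intro hmem
    by_contra hkm
    have hkm' : m + 1 ≤ k := by push_cast at hkm; omega
    obtain ⟨hklen, hkeq⟩ := lastIdx_some_spec l c k hk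
    exact hmem ((mem_drop_iff l (m + 1) c).2
      ⟨k, hkm', hklen, by simpa [List.getElem?_eq_getElem hklen] using hkeq⟩)

-- A's cut condition (index reached the running max) ↔ B's cut condition
theorem cond_eq (l : List Char) (m : Nat) (hm : m < l.length) :
    ((m : Int) = pmax l (m + 1)) ↔
      (PySem.Set.isdisjoint (PySem.Set.ofList (l.take (m + 1))) (l.drop (m + 1)) = true) := by
  have hub := le_pmax_succ l m hm
  have hiff : (PySem.Set.isdisjoint (PySem.Set.ofList (l.take (m + 1))) (l.drop (m + 1)) = true)
      ↔ ∀ c ∈ l.take (m + 1), c ∉ l.drop (m + 1) := by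
    unfold PySem.Set.isdisjoint
    simp [PySem.Set.mem_ofList]
  rw [hiff]
  constructor
  · intro heq c hc
    have hle : lv l c ≤ pmax l (m + 1) :=
      (PySem.List.le_foldl_max_int (l.take (m + 1)) (lv l) 0).2 c hc
    exact (lv_le_iff l m c hc).1 (by omega)
  · intro h
    have : pmax l (m + 1) ≤ (m : Int) :=
      pmax_le l (m + 1) m (by positivity) (fun c hc => (lv_le_iff l m c hc).2 (h c hc))
    omega

-- both loops, run over the first m indices, are related as stated
theorem loop_eq (l : List Char) (m : Nat) (hm : m ≤ l.length) :
    (PySem.List.enumerate (l.take m) 0).foldl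
      (fun (st : List Int × Int × Int) p =>
        let right := max st.2.1 ((buildD l).getD p.2 0)
        if p.1 = right then (st.1 ++ [right - st.2.2 + 1], right, right + 1)
        else (st.1, right, st.2.2))
      ([], 0, 0)
    = (((PySem.List.pyRange 0 (m : Int) 1).foldl
        (fun (st : List Int × Int) i =>
          if PySem.Set.isdisjoint (PySem.Set.ofList (PySem.List.slice l none (some (i + 1))))
               (PySem.List.slice l (some (i + 1)) none)
          then (st.1 ++ [i - st.2], i)
          else st)
        ([], -1)).1,
       pmax l m,
       ((PySem.List.pyRange 0 (m : Int) 1).foldl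
        (fun (st : List Int × Int) i =>
          if PySem.Set.isdisjoint (PySem.Set.ofList (PySem.List.slice l none (some (i + 1))))
               (PySem.List.slice l (some (i + 1)) none)
          then (st.1 ++ [i - st.2], i)
          else st)
        ([], -1)).2 + 1) := by
  induction m with
  | zero =>
    rw [PySem.List.pyRange_one_eq_nil (by simp)]
    simp [PySem.List.enumerate_nil, pmax]
  | succ m ih =>
    have hm' : m < l.length := hm
    have hA : PySem.List.enumerate (l.take (m + 1)) 0
        = PySem.List.enumerate (l.take m) 0 ++ [((m : Int), l[m])] := by
      rw [← List.take_concat_get (l := l) (i := m) hm', List.concat_eq_append,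
        PySem.List.enumerate_append]
      simp [PySem.List.enumerate_cons, PySem.List.enumerate_nil, List.length_take,
        Nat.min_eq_left (le_of_lt hm')]
    have hB : PySem.List.pyRange 0 ((m + 1 : Nat) : Int) 1
        = PySem.List.pyRange 0 (m : Int) 1 ++ [(m : Int)] := by
      push_cast
      exact PySem.List.pyRange_one_succ_right (by positivity)
    have hsl1 : PySem.List.slice l none (some ((m : Int) + 1)) = l.take (m + 1) := by
      have h1 : ((m : Int) + 1) = ((m + 1 : Nat) : Int) := by push_cast; ring
      rw [h1, PySem.List.slice_to_natCast]
    have hsl2 : PySem.List.slice l (some ((m : Int) + 1)) none = l.drop (m + 1) := by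
      have h1 : ((m : Int) + 1) = ((m + 1 : Nat) : Int) := by push_cast; ring
      rw [h1, PySem.List.slice_from_natCast]
    rw [hA, hB, List.foldl_append, List.foldl_append, List.foldl_cons, List.foldl_nil,
      List.foldl_cons, List.foldl_nil, ih (le_of_lt hm')]
    simp only [buildD_getD l l[m] (List.getElem_mem hm'), ← pmax_succ l m hm', hsl1, hsl2]
    by_cases hcond : (PySem.Set.isdisjoint (PySem.Set.ofList (l.take (m + 1))) (l.drop (m + 1)) = true)
    · have heq : (m : Int) = pmax l (m + 1) := (cond_eq l m hm').2 hcond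
      rw [if_pos hcond, if_pos heq, ← heq]
      simp only [Prod.mk.injEq, List.append_right_inj, List.cons.injEq, and_true]
      ring
    · have hne : ¬ ((m : Int) = pmax l (m + 1)) := fun h => hcond ((cond_eq l m hm').1 h)
      rw [if_neg hcond, if_neg hne]

-- ===== VERDICT (by name: the statement is the Claim_ definition above) =====
theorem partition_label_spec : Claim_equal_partition_label := by
  intro string _
  unfold Spec_partition_label
  have h := loop_eq string.toList string.toList.length le_rfl
  rw [List.take_length] at h
  have e1 : partition_label string
      = ((PySem.List.enumerate string.toList 0).foldl
          (fun (st : List Int × Int × Int) p =>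
            let right := max st.2.1 ((buildD string.toList).getD p.2 0)
            if p.1 = right then (st.1 ++ [right - st.2.2 + 1], right, right + 1)
            else (st.1, right, st.2.2))
          ([], 0, 0)).1 := rfl
  have e2 : partition_label_alt string
      = ((PySem.List.pyRange 0 ((string.toList.length : Int)) 1).foldl
          (fun (st : List Int × Int) i =>
            if PySem.Set.isdisjoint
                 (PySem.Set.ofList (PySem.List.slice string.toList none (some (i + 1))))
                 (PySem.List.slice string.toList (some (i + 1)) none)
            then (st.1 ++ [i - st.2], i)
            else st)
          ([], -1)).1 := by
    simp only [partition_label_alt, PySem.Chars.len_eq]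
  rw [e1, e2, h]
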